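-- pv_equiv track=rewrite | github.com/ivelet/CRISPREvo | NCBI-Download/helpers.py | assign_chunk_to_index
-- ===== SOURCE A (Python) =====
-- def assign_chunk_to_index(total_numbers, number_chunks):
--     chunk_size = total_numbers // number_chunks
--     residual = total_numbers % number_chunks
--     chunk_sizes = [chunk_size + 1 if (i <= residual - 1) else chunk_size for i in range(number_chunks)]
--     cumulative_sizes = [sum(chunk_sizes[:i]) for i in range(number_chunks+1)]
--
--     dict_chunk_sizes = {}
--     for i in range(1, total_numbers+1):
--         for j in cumulative_sizes:
--             if i <= j:
--                 chunk_index = cumulative_sizes.index(j)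
--                 dict_chunk_sizes[i] = chunk_index
--                 break
--
--     return dict_chunk_sizes
-- ===== SOURCE B (Python) =====
-- def assign_chunk_to_index(total_numbers, number_chunks):
--     # Assign each chunk its contiguous range of numbers directly: O(total + chunks)
--     # instead of scanning the cumulative list for every number.
--     chunk_size = total_numbers // number_chunks
--     residual = total_numbers % number_chunks
--     result = {}
--     start = 0
--     for k in range(number_chunks):
--         size = chunk_size + 1 if k < residual else chunk_size
--         for i in range(start + 1, start + size + 1):
--             result[i] = k + 1
--         start += size
--     return result
-- ===== Notes on version B (the rewrite author's own statement) =====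
-- stated objective: faster
-- what changed: Instead of scanning the cumulative-size list for every number and calling list.index on the hit, B walks the chunks once and assigns each chunk's contiguous range of numbers directly.
import Mathlib
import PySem

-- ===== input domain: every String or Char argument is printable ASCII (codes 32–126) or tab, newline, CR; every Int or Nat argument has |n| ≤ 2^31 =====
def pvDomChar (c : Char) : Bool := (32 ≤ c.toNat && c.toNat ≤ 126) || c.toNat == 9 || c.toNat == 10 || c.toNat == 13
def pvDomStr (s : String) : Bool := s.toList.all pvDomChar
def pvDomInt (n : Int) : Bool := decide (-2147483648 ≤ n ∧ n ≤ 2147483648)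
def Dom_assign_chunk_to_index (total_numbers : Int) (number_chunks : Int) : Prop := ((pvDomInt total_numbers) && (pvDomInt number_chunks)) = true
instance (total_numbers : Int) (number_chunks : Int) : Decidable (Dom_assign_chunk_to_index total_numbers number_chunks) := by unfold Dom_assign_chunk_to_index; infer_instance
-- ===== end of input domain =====

-- B walks the chunks once and assigns each chunk's contiguous range of numbers directly,
-- instead of A's scan of the cumulative-size list for every single number (objective: faster).

-- ===== PORT A =====
def assign_chunk_to_index (total_numbers : Int) (number_chunks : Int) : List (Int × Int) :=
  let chunk_size := PySem.Int.floordiv total_numbers number_chunks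
  let residual := PySem.Int.mod total_numbers number_chunks
  let chunk_sizes := (PySem.List.pyRange 0 number_chunks 1).map
    (fun i => if i ≤ residual - 1 then chunk_size + 1 else chunk_size)
  let cumulative_sizes := (PySem.List.pyRange 0 (number_chunks + 1) 1).map
    (fun i => (PySem.List.slice chunk_sizes none (some i)).sum)
  let d := (PySem.List.pyRange 1 (total_numbers + 1) 1).foldl
    (fun (d : PySem.Dict Int Int) i =>
      -- inner 'for j in cumulative_sizes: if i <= j: … break' = first j with i ≤ j
      match cumulative_sizes.find? (fun j => decide (i ≤ j)) with
      | some j =>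
        match PySem.List.index? cumulative_sizes j with
        | some ci => d.insert i (ci : Int)
        | none => d        -- unreachable: j was found in the list
      | none => d)
    PySem.Dict.empty
  d.items

-- ===== PORT B =====
def assign_chunk_to_index_alt (total_numbers : Int) (number_chunks : Int) : List (Int × Int) :=
  let chunk_size := PySem.Int.floordiv total_numbers number_chunks
  let residual := PySem.Int.mod total_numbers number_chunks
  let st := (PySem.List.pyRange 0 number_chunks 1).foldl
    (fun (st : PySem.Dict Int Int × Int) k =>
      let size := if k < residual then chunk_size + 1 else chunk_size
      ((PySem.List.pyRange (st.2 + 1) (st.2 + size + 1) 1).foldl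
        (fun d i => d.insert i (k + 1)) st.1,
       st.2 + size))
    (PySem.Dict.empty, 0)
  st.1.items

-- ===== PRECONDITION & SPEC =====
-- Pre_ excludes only number_chunks = 0, where A raises ZeroDivisionError.
def Pre_assign_chunk_to_index (total_numbers : Int) (number_chunks : Int) : Prop := number_chunks ≠ 0
instance (total_numbers : Int) (number_chunks : Int) : Decidable (Pre_assign_chunk_to_index total_numbers number_chunks) := by unfold Pre_assign_chunk_to_index; infer_instance
def pvWitness_assign_chunk_to_index : Int × Int := (7, 3)

def Spec_assign_chunk_to_index (total_numbers : Int) (number_chunks : Int) (out : List (Int × Int)) : Prop := out = assign_chunk_to_index_alt total_numbers number_chunks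
instance (total_numbers : Int) (number_chunks : Int) (out : List (Int × Int)) : Decidable (Spec_assign_chunk_to_index total_numbers number_chunks out) := by unfold Spec_assign_chunk_to_index; infer_instance

-- ===== CLAIM (what is proved, stated in full; the proofs are below) =====
def Claim_equal_assign_chunk_to_index : Prop := ∀ (total_numbers : Int) (number_chunks : Int), Dom_assign_chunk_to_index total_numbers number_chunks → Pre_assign_chunk_to_index total_numbers number_chunks → Spec_assign_chunk_to_index total_numbers number_chunks (assign_chunk_to_index total_numbers number_chunks)

-- ===== LEMMAS AND PROOFS =====

-- cumulative size after m chunks, in closed form: m·q + min m r  (q = total // nc, r = total % nc)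
def pvC (q r m : Int) : Int := m * q + min m r
-- size of chunk k
def pvS (q r k : Int) : Int := if k < r then q + 1 else q

theorem pvC_succ (q r k : Int) : pvC q r (k + 1) = pvC q r k + pvS q r k := by
  unfold pvC pvS
  have h : min (k + 1) r = min k r + (if k < r then 1 else 0) := by split_ifs <;> omega
  rw [h]; split_ifs <;> ring

theorem pvC_mono (q r a b : Int) (hq : 0 ≤ q) (hab : a ≤ b) : pvC q r a ≤ pvC q r b := by
  unfold pvC
  have h1 : a * q ≤ b * q := mul_le_mul_of_nonneg_right hab hq
  have h2 : min a r ≤ min b r := by omega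
  linarith

theorem pvC_zero (q r : Int) (hr : 0 ≤ r) : pvC q r 0 = 0 := by
  unfold pvC; omega

-- A's chunk-size list summed over a prefix is the closed form pvC
theorem pvSum (q r : Int) (hr : 0 ≤ r) : ∀ n : Nat,
    (((PySem.List.pyRange 0 (n : Int) 1).map (fun i => if i ≤ r - 1 then q + 1 else q)).sum : Int)
      = pvC q r (n : Int) := by
  intro n
  induction n with
  | zero => simp [PySem.List.pyRange_one_eq_nil (by omega : (0:Int) ≤ 0), pvC]; omega
  | succ n ih =>
    have h : ((n : Int) + 1) = ((n + 1 : Nat) : Int) := by push_cast; ring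
    rw [← h, PySem.List.pyRange_one_succ_right (by positivity), List.map_append, List.sum_append, ih]
    have hs : (if (n : Int) ≤ r - 1 then q + 1 else q) = pvS q r (n : Int) := by
      unfold pvS; split_ifs <;> omega
    simp only [List.map_cons, List.map_nil, List.sum_cons, List.sum_nil, add_zero, hs]
    rw [pvC_succ]

-- A's per-number scan, for a number i inside chunk t, inserts (i, t+1)
theorem pvBodyA (q r nc t i : Int) (hq : 0 ≤ q) (ht0 : 0 ≤ t) (ht : t < nc)
    (hi1 : pvC q r t < i) (hi2 : i ≤ pvC q r (t + 1)) (d : PySem.Dict Int Int) :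
    (match ((PySem.List.pyRange 0 (nc + 1) 1).map (pvC q r)).find? (fun j => decide (i ≤ j)) with
     | some j =>
       match PySem.List.index? ((PySem.List.pyRange 0 (nc + 1) 1).map (pvC q r)) j with
       | some ci => d.insert i (ci : Int)
       | none => d
     | none => d) = d.insert i (t + 1) := by
  have hsplit : PySem.List.pyRange 0 (nc + 1) 1
      = PySem.List.pyRange 0 (t + 1) 1 ++ (t + 1) :: PySem.List.pyRange (t + 1 + 1) (nc + 1) 1 := by
    have hmid : PySem.List.pyRange (t + 1) (nc + 1) 1
        = (t + 1) :: PySem.List.pyRange (t + 1 + 1) (nc + 1) 1 :=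
      PySem.List.pyRange_one_cons (show t + 1 < nc + 1 by omega)
    rw [PySem.List.pyRange_one_append 0 (t + 1) (nc + 1) (by omega) (by omega), hmid]
  have hpre : ∀ j ∈ PySem.List.pyRange 0 (t + 1) 1, pvC q r j < i := by
    intro j hj
    have := (PySem.List.mem_pyRange_one).mp hj
    exact lt_of_le_of_lt (pvC_mono q r j t hq (by omega)) hi1
  have hfind : ((PySem.List.pyRange 0 (nc + 1) 1).map (pvC q r)).find? (fun j => decide (i ≤ j))
      = some (pvC q r (t + 1)) := by
    rw [hsplit, List.map_append, List.find?_append]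
    have h1 : ((PySem.List.pyRange 0 (t + 1) 1).map (pvC q r)).find? (fun j => decide (i ≤ j)) = none := by
      rw [List.find?_eq_none]
      intro x hx
      rcases List.mem_map.mp hx with ⟨j, hj, rfl⟩
      simpa using not_le.mpr (hpre j hj)
    rw [h1, List.map_cons]
    simp [hi2]
  have hidx : PySem.List.index? ((PySem.List.pyRange 0 (nc + 1) 1).map (pvC q r)) (pvC q r (t + 1))
      = some (t + 1).toNat := by
    rw [PySem.List.index?_eq_some_iff]
    refine ⟨(PySem.List.pyRange 0 (t + 1) 1).map (pvC q r),
           (PySem.List.pyRange (t + 1 + 1) (nc + 1) 1).map (pvC q r), ?_, ?_, ?_⟩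
    · rw [hsplit, List.map_append, List.map_cons]
    · simp [PySem.List.length_pyRange_one]
    · intro hmem
      rcases List.mem_map.mp hmem with ⟨j, hj, hEq⟩
      have := hpre j hj
      omega
  simp only [hfind, hidx]
  congr 1
  omega

-- splitting the full number range 1..total into per-chunk ranges
theorem pvRangeFlat (q r : Int) (hq : 0 ≤ q) : ∀ (n : Nat) (a : Int), 0 ≤ a →
    (PySem.List.pyRange a (a + (n : Int)) 1).flatMap
        (fun t => PySem.List.pyRange (pvC q r t + 1) (pvC q r (t + 1) + 1) 1)
      = PySem.List.pyRange (pvC q r a + 1) (pvC q r (a + (n : Int)) + 1) 1 := by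
  intro n
  induction n with
  | zero =>
    intro a _
    have h0 : a + ((0 : Nat) : Int) = a := by push_cast; ring
    rw [h0, PySem.List.pyRange_one_eq_nil (le_refl a),
        PySem.List.pyRange_one_eq_nil (le_refl (pvC q r a + 1))]
    rfl
  | succ n ih =>
    intro a ha
    have he : a + ((n + 1 : Nat) : Int) = (a + 1) + (n : Int) := by push_cast; ring
    rw [he, PySem.List.pyRange_one_cons (by omega), List.flatMap_cons,
        ih (a + 1) (by omega)]
    exact (PySem.List.pyRange_one_append (pvC q r a + 1) (pvC q r (a + 1) + 1)
          (pvC q r ((a + 1) + (n : Int)) + 1)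
          (by have := pvC_mono q r a (a + 1) hq (by omega); omega)
          (by have := pvC_mono q r (a + 1) ((a + 1) + (n : Int)) hq (by omega); omega)).symm

-- B's outer loop, started at chunk a with offset pvC q r a, is the per-chunk nested fold
theorem pvBside (q r : Int) : ∀ (n : Nat) (a : Int) (d : PySem.Dict Int Int),
    ((PySem.List.pyRange a (a + (n : Int)) 1).foldl
        (fun (st : PySem.Dict Int Int × Int) k =>
          ((PySem.List.pyRange (st.2 + 1) (st.2 + (if k < r then q + 1 else q) + 1) 1).foldl
              (fun d i => d.insert i (k + 1)) st.1,
           st.2 + (if k < r then q + 1 else q)))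
        (d, pvC q r a)).1
      = (PySem.List.pyRange a (a + (n : Int)) 1).foldl
          (fun d t => (PySem.List.pyRange (pvC q r t + 1) (pvC q r (t + 1) + 1) 1).foldl
              (fun d i => d.insert i (t + 1)) d) d := by
  intro n
  induction n with
  | zero =>
    intro a d
    have h0 : a + ((0 : Nat) : Int) = a := by push_cast; ring
    rw [h0, PySem.List.pyRange_one_eq_nil (le_refl a)]
    rfl
  | succ n ih =>
    intro a d
    have he : a + ((n + 1 : Nat) : Int) = (a + 1) + (n : Int) := by push_cast; ring
    have hsz : (if a < r then q + 1 else q) = pvS q r a := rfl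
    rw [he, PySem.List.pyRange_one_cons (by omega)]
    simp only [List.foldl_cons, hsz]
    rw [show pvC q r a + pvS q r a = pvC q r (a + 1) from (pvC_succ q r a).symm]
    exact ih (a + 1) _

-- B's outer loop produces the empty dict when every chunk size is ≤ 0
theorem pvBempty (q r : Int) : ∀ (l : List Int),
    (∀ k ∈ l, (if k < r then q + 1 else q) ≤ 0) → ∀ (d : PySem.Dict Int Int) (st : Int),
    ((l.foldl
        (fun (st : PySem.Dict Int Int × Int) k =>
          ((PySem.List.pyRange (st.2 + 1) (st.2 + (if k < r then q + 1 else q) + 1) 1).foldl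
              (fun d i => d.insert i (k + 1)) st.1,
           st.2 + (if k < r then q + 1 else q)))
        (d, st)).1) = d := by
  intro l
  induction l with
  | nil => intro _ d st; rfl
  | cons k l ih =>
    intro h d st
    have hk := h k (by simp)
    simp only [List.foldl_cons]
    rw [PySem.List.pyRange_one_eq_nil (by omega : st + (if k < r then q + 1 else q) + 1 ≤ st + 1)]
    exact ih (fun k hk => h k (by simp [hk])) d _

-- ===== VERDICT (by name: the statement is the Claim_ definition above) =====
theorem assign_chunk_to_index_spec : Claim_equal_assign_chunk_to_index := by
  intro total nc _ hpre
  unfold Spec_assign_chunk_to_index assign_chunk_to_index assign_chunk_to_index_alt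
  simp only []
  have hnc0 : nc ≠ 0 := hpre
  set q := PySem.Int.floordiv total nc with hqdef
  set r := PySem.Int.mod total nc with hrdef
  have hqr : q * nc + r = total := PySem.Int.floordiv_mul_add_mod total nc
  by_cases hneg : nc < 0
  · -- negative number_chunks: both loops run over empty ranges, both return {}
    rw [PySem.List.pyRange_one_eq_nil (by omega : nc + 1 ≤ 0),
        PySem.List.pyRange_one_eq_nil (by omega : nc ≤ 0)]
    simp
  · have hncpos : 0 < nc := by omega
    have hr0 : 0 ≤ r := PySem.Int.mod_nonneg total hncpos
    have hrlt : r < nc := PySem.Int.mod_lt total hncpos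
    by_cases htot : total ≤ 0
    · -- total ≤ 0: A's number loop is empty; B's chunk sizes are all ≤ 0
      rw [PySem.List.pyRange_one_eq_nil (by omega : total + 1 ≤ 1)]
      have hqnc : 0 ≤ q → 0 ≤ q * nc := fun h => mul_nonneg h (by omega)
      have hq_nonpos : ∀ k ∈ PySem.List.pyRange 0 nc 1, (if k < r then q + 1 else q) ≤ 0 := by
        intro k hk
        have hkb := (PySem.List.mem_pyRange_one).mp hk
        by_cases hkr : k < r
        · have hq1 : q < 0 := by
            by_contra hc
            have h1 := hqnc (by omega)
            have hrpos : 0 < r := by omega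
            linarith
          rw [if_pos hkr]; omega
        · have hq2 : q ≤ 0 := by
            by_contra hc
            have h2 : nc * 1 ≤ nc * q :=
              mul_le_mul_of_nonneg_left (by omega) (by omega)
            have h3 : nc * q = q * nc := by ring
            linarith
          rw [if_neg hkr]; omega
      simp only [List.foldl_nil]
      rw [pvBempty q r _ hq_nonpos]
    · -- main case: 1 ≤ total, 0 < nc
      have htot1 : 1 ≤ total := by omega
      have hq : 0 ≤ q := by
        by_contra hc
        have : q * nc ≤ (-1) * nc := mul_le_mul_of_nonneg_right (by omega) (by omega)
        linarith
      -- A's cumulative list is the closed form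
      have hcum : (PySem.List.pyRange 0 (nc + 1) 1).map
            (fun i => (PySem.List.slice
              ((PySem.List.pyRange 0 nc 1).map (fun i => if i ≤ r - 1 then q + 1 else q))
              none (some i)).sum)
          = (PySem.List.pyRange 0 (nc + 1) 1).map (pvC q r) := by
        apply List.map_congr_left
        intro m hm
        have hmb := (PySem.List.mem_pyRange_one).mp hm
        rw [PySem.List.slice_to _ (show (0:Int) ≤ m from by omega)]
        rw [← List.map_take]
        have htk : (PySem.List.pyRange 0 nc 1).take m.toNat = PySem.List.pyRange 0 m 1 := by
          rw [PySem.List.pyRange_one_append 0 m nc (by omega) (by omega)]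
          exact List.take_left' (by simp [PySem.List.length_pyRange_one])
        rw [htk]
        have := pvSum q r hr0 m.toNat
        rw [show ((m.toNat : Nat) : Int) = m from by omega] at this
        exact this
      have htotC : total = pvC q r nc := by
        unfold pvC
        have : min nc r = r := by omega
        rw [this]; linarith
      rw [hcum]
      -- A's number loop, reorganised chunk by chunk
      have hflat := pvRangeFlat q r hq nc.toNat 0 (le_refl 0)
      rw [pvC_zero q r hr0, show ((0:Int) + (nc.toNat : Int)) = nc from by omega] at hflat
      have hA : (PySem.List.pyRange 1 (total + 1) 1).foldl
            (fun (d : PySem.Dict Int Int) i =>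
              match ((PySem.List.pyRange 0 (nc + 1) 1).map (pvC q r)).find? (fun j => decide (i ≤ j)) with
              | some j =>
                match PySem.List.index? ((PySem.List.pyRange 0 (nc + 1) 1).map (pvC q r)) j with
                | some ci => d.insert i (ci : Int)
                | none => d
              | none => d)
            PySem.Dict.empty
          = (PySem.List.pyRange 0 nc 1).foldl
              (fun d t => (PySem.List.pyRange (pvC q r t + 1) (pvC q r (t + 1) + 1) 1).foldl
                  (fun d i => d.insert i (t + 1)) d) PySem.Dict.empty := by
        rw [show ((0:Int) + 1) = 1 from by ring] at hflat
        rw [← htotC] at hflat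
        rw [← hflat, List.foldl_flatMap]
        apply PySem.List.foldl_congr_mem
        intro d t ht
        have htb := (PySem.List.mem_pyRange_one).mp ht
        apply PySem.List.foldl_congr_mem
        intro d' i hi
        have hib := (PySem.List.mem_pyRange_one).mp hi
        exact pvBodyA q r nc t i hq (by omega) (by omega) (by omega) (by omega) d'
      rw [hA]
      -- B's loop is the same nested fold
      have hB := pvBside q r nc.toNat 0
      rw [pvC_zero q r hr0, show ((0:Int) + (nc.toNat : Int)) = nc from by omega] at hB
      rw [hB]
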